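-- pv_equiv track=rewrite | github.com/himanshur-qorix/Parasoft_Analaysis_Tool | scripts/apply_suppress_comments.py | is_inside_comment_block
-- ===== SOURCE A (Python) =====
-- def is_inside_comment_block(lines, line_num):
--     """
--     Check if a line is inside a comment block
--
--     Args:
--         lines: List of file lines
--         line_num: Line number to check (1-indexed)
--
--     Returns:
--         True if inside comment block, False otherwise
--     """
--     # Track if we're inside a multi-line comment
--     in_comment = False
--
--     for i in range(line_num):
--         line = lines[i].strip()
--
--         # Check for comment start
--         if '/*' in line:
--             in_comment = True
--
--         # Check for comment end
--         if '*/' in line: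
--             in_comment = False
--
--     return in_comment
-- ===== SOURCE B (Python) =====
-- def is_inside_comment_block(lines, line_num):
--     # Scan backwards: the last marker line before line_num decides the answer.
--     for i in range(line_num - 1, -1, -1):
--         line = lines[i].strip()
--         if '*/' in line:
--             return False
--         if '/*' in line:
--             return True
--     return False
-- ===== Notes on version B (the rewrite author's own statement) =====
-- stated objective: alternative
-- what changed: Replaces A's forward full sweep maintaining a toggled in_comment flag with a backward early-exit scan that returns as soon as the last marker-bearing line before line_num is found ('*/' -> False, '/*' -> True, none -> False).
import Mathlib
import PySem

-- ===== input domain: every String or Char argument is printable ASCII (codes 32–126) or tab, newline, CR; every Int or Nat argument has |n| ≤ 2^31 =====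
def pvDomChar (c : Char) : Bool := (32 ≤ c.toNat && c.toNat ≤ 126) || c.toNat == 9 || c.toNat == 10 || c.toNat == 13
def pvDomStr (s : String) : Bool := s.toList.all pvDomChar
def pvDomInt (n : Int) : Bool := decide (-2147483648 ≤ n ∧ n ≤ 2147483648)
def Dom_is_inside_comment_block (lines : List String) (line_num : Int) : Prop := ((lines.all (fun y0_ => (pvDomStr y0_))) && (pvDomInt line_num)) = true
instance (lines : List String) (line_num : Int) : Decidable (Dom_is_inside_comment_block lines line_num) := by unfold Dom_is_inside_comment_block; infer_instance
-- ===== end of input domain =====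

-- B replaces A's forward toggled-flag sweep with a backward early-exit scan for the
-- last marker line; same results, same cost class ('alternative', no speed claim).

-- ===== PORT A =====
-- Forward sweep over range(line_num), toggling in_comment.
-- (lines[i] is ported as pyGetD with default ""; Pre_ guarantees i is in range.)
def is_inside_comment_block (lines : List String) (line_num : Int) : Bool :=
  (PySem.List.pyRange 0 line_num 1).foldl
    (fun in_comment i =>
      let line := PySem.Str.strip (PySem.List.pyGetD lines i "")
      let c := if PySem.Str.isIn "/*" line then true else in_comment
      if PySem.Str.isIn "*/" line then false else c)
    false

-- ===== PORT B =====
-- Backward scan with early return; follows Source B's for-loop over range(line_num-1, -1, -1).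
def altGo (lines : List String) : List Int → Bool
  | [] => false
  | i :: rest =>
    let line := PySem.Str.strip (PySem.List.pyGetD lines i "")
    if PySem.Str.isIn "*/" line then false
    else if PySem.Str.isIn "/*" line then true
    else altGo lines rest

def is_inside_comment_block_alt (lines : List String) (line_num : Int) : Bool :=
  altGo lines (PySem.List.pyRange (line_num - 1) (-1) (-1))

-- ===== PRECONDITION & SPEC =====
-- Python A raises IndexError when line_num > len(lines); exactly those inputs are excluded.
def Pre_is_inside_comment_block (lines : List String) (line_num : Int) : Prop :=
  line_num ≤ (lines.length : Int)
instance (lines : List String) (line_num : Int) : Decidable (Pre_is_inside_comment_block lines line_num) := by unfold Pre_is_inside_comment_block; infer_instance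

def pvWitness_is_inside_comment_block : List String × Int := (["/* open", "int x;"], 2)

def Spec_is_inside_comment_block (lines : List String) (line_num : Int) (out : Bool) : Prop := out = is_inside_comment_block_alt lines line_num
instance (lines : List String) (line_num : Int) (out : Bool) : Decidable (Spec_is_inside_comment_block lines line_num out) := by unfold Spec_is_inside_comment_block; infer_instance

-- ===== CLAIM (what is proved, stated in full; the proofs are below) =====
def Claim_equal_is_inside_comment_block : Prop := ∀ (lines : List String) (line_num : Int), Dom_is_inside_comment_block lines line_num → Pre_is_inside_comment_block lines line_num → Spec_is_inside_comment_block lines line_num (is_inside_comment_block lines line_num)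

-- ===== LEMMAS AND PROOFS =====

-- The two scans agree for every natural bound n (no range-bound on n is needed:
-- both ports read lines[i] through pyGetD "").
lemma forward_eq_backward (lines : List String) (n : Nat) :
    is_inside_comment_block lines (n : Int) = altGo lines (PySem.List.pyRange ((n : Int) - 1) (-1) (-1)) := by
  induction n with
  | zero =>
    simp [is_inside_comment_block, PySem.List.pyRange_one_eq_nil,
      PySem.List.pyRange_neg_one_eq_nil, altGo]
  | succ n ih =>
    have h1 : PySem.List.pyRange 0 ((n : Int) + 1) 1
        = PySem.List.pyRange 0 (n : Int) 1 ++ [(n : Int)] :=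
      PySem.List.pyRange_one_succ_right (by omega)
    have h2 : PySem.List.pyRange ((n : Int) + 1 - 1) (-1) (-1)
        = (n : Int) :: PySem.List.pyRange ((n : Int) - 1) (-1) (-1) := by
      have := PySem.List.pyRange_neg_one_cons (a := (n : Int)) (b := (-1)) (by omega)
      simpa using this
    unfold is_inside_comment_block at ih ⊢
    push_cast
    rw [h1, List.foldl_append, h2, altGo, ← ih]
    simp only [List.foldl_cons, List.foldl_nil]

-- ===== VERDICT (by name: the statement is the Claim_ definition above) =====
theorem is_inside_comment_block_spec : Claim_equal_is_inside_comment_block := by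
  intro lines line_num _ _
  unfold Spec_is_inside_comment_block is_inside_comment_block_alt
  by_cases h : 0 ≤ line_num
  · obtain ⟨n, rfl⟩ := Int.eq_ofNat_of_zero_le h
    exact forward_eq_backward lines n
  · have e1 : PySem.List.pyRange 0 line_num 1 = [] :=
      PySem.List.pyRange_one_eq_nil (by omega)
    have e2 : PySem.List.pyRange (line_num - 1) (-1) (-1) = [] :=
      PySem.List.pyRange_neg_one_eq_nil (by omega)
    simp [is_inside_comment_block, e1, e2, altGo]
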